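-- pv_equiv track=rewrite | github.com/JaininV/burrito_sales_analysis | IBM_code/distinct.py | disticnt_txt
-- ===== SOURCE A (Python) =====
-- def disticnt_txt(txt, limit):
--     txt = txt.replace(" ", "")
--     txt = txt.lower()
--     l = len(txt)
--     dis_arr = ['a', 'e', 'i', 'o', 'u']
--     count = 0
--
--     if l>=limit:
--         for i in range(limit):
--             if txt[i] in dis_arr:
--                 count += 1
--
--             else:
--                 continue
--         return count
--
--     else:
--         return "Text length is lower than limit!"
-- ===== SOURCE B (Python) =====
-- def disticnt_txt(txt, limit):
--     s = txt.replace(" ", "").lower()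
--     if len(s) >= limit:
--         return sum(s[:max(0, limit)].count(v) for v in "aeiou")
--     else:
--         return "Text length is lower than limit!"
-- ===== Notes on version B (the rewrite author's own statement) =====
-- stated objective: idiomatic
-- what changed: Replaces the per-character Python-level membership loop over range(limit) by five C-level str.count scans of the prefix slice s[:max(0,limit)], summed.
import Mathlib
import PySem

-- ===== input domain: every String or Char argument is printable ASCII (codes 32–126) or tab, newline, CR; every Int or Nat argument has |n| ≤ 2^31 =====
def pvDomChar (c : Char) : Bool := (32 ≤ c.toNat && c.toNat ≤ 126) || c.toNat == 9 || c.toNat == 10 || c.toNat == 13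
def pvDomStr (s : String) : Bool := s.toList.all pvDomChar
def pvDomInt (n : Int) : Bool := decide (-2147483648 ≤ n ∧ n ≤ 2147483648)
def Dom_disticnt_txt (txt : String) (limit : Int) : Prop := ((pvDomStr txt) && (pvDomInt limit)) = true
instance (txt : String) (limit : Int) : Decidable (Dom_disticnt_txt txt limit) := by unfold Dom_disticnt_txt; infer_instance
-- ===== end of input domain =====

-- B counts each vowel with a separate scan of the prefix slice instead of testing membership
-- once per character (objective: idiomatic); same value on all admitted inputs.

-- ===== PORT A =====
-- A: strip spaces, lowercase, then for i in range(limit) count txt[i] ∈ ['a','e','i','o','u'].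
def disticnt_txt (txt : String) (limit : Int) : Int :=
  let s : List Char := PySem.Chars.lower (PySem.Chars.replace txt.toList [' '] [])
  let l : Int := (s.length : Int)
  if l ≥ limit then
    (PySem.List.pyRange 0 limit 1).foldl
      (fun count i =>
        if (['a', 'e', 'i', 'o', 'u'] : List Char).contains (PySem.List.pyGetD s i ' ') then
          count + 1
        else count) 0
  else 0  -- Python returns the error STRING here (not an int); excluded by Pre_disticnt_txt

-- ===== PORT B =====
-- B: sum(s[:max(0, limit)].count(v) for v in "aeiou")
def disticnt_txt_alt (txt : String) (limit : Int) : Int :=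
  let s : List Char := PySem.Chars.lower (PySem.Chars.replace txt.toList [' '] [])
  if (s.length : Int) ≥ limit then
    (("aeiou".toList).map
      (fun v => (PySem.Chars.count (PySem.List.slice s none (some (max 0 limit))) [v] : Int))).sum
  else 0  -- Python returns the error STRING here (not an int); excluded by Pre_disticnt_txt

-- ===== PRECONDITION & SPEC =====
-- Pre_ excludes exactly the inputs with limit greater than the cleaned text's length, on which
-- A (and B) return the error STRING "Text length is lower than limit!", not an int.
def Pre_disticnt_txt (txt : String) (limit : Int) : Prop :=
  limit ≤ ((PySem.Chars.lower (PySem.Chars.replace txt.toList [' '] [])).length : Int)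
instance (txt : String) (limit : Int) : Decidable (Pre_disticnt_txt txt limit) := by
  unfold Pre_disticnt_txt; infer_instance

def pvWitness_disticnt_txt : String × Int := ("Hello World", 5)

def Spec_disticnt_txt (txt : String) (limit : Int) (out : Int) : Prop := out = disticnt_txt_alt txt limit
instance (txt : String) (limit : Int) (out : Int) : Decidable (Spec_disticnt_txt txt limit out) := by
  unfold Spec_disticnt_txt; infer_instance

-- ===== CLAIM (what is proved, stated in full; the proofs are below) =====
def Claim_equal_disticnt_txt : Prop := ∀ (txt : String) (limit : Int), Dom_disticnt_txt txt limit → Pre_disticnt_txt txt limit → Spec_disticnt_txt txt limit (disticnt_txt txt limit)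

-- ===== LEMMAS AND PROOFS =====

-- PySem.Chars.count with a single-character needle is List.count.
theorem countGo_single (v : Char) : ∀ (fuel : Nat) (s : List Char) (acc : Nat),
    s.length ≤ fuel → PySem.Chars.count.go [v] fuel s acc = acc + s.count v := by
  intro fuel
  induction fuel with
  | zero => intro s acc h; cases s with
    | nil => simp [PySem.Chars.count.go]
    | cons c t => simp only [List.length_cons] at h; omega
  | succ f ih =>
    intro s acc h
    cases s with
    | nil => rw [PySem.Chars.count.go] <;> simp
    | cons c t =>
      simp only [PySem.Chars.count.go]
      by_cases hvc : v = c
      · subst hvc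
        simp only [List.isPrefixOf, BEq.rfl, Bool.true_and, if_true]
        rw [List.length_cons] at h
        rw [show [v].length = 1 from rfl, List.drop_one, List.tail_cons,
          ih t (acc + 1) (by omega)]
        simp [List.count_cons]
        omega
      · have : ([v].isPrefixOf (c :: t)) = false := by
          simp [List.isPrefixOf, hvc]
        rw [this]
        simp only [Bool.false_eq_true, if_false]
        rw [List.length_cons] at h
        rw [ih t acc (by omega)]
        simp [List.count_cons, hvc]
        exact fun h => hvc h.symm

theorem count_single (s : List Char) (v : Char) :
    PySem.Chars.count s [v] = s.count v := by
  unfold PySem.Chars.count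
  simp only [List.isEmpty_cons, if_false, Bool.false_eq_true]
  exact (countGo_single v s.length s 0 le_rfl).trans (by omega)

-- index loop over range n = loop over the prefix take n
theorem countP_getD_range (q : Char → Bool) (d : Char) :
    ∀ (n : Nat) (s : List Char), n ≤ s.length →
    (List.range n).countP (fun k => q (s.getD k d)) = (s.take n).countP q := by
  intro n
  induction n with
  | zero => simp
  | succ m ih =>
    intro s h
    rw [List.range_succ, List.countP_append, ih s (by omega)]
    have hm : m < s.length := by omega
    rw [List.take_succ, List.countP_append]
    simp [List.getD, List.getElem?_eq_getElem hm]

-- per-vowel counts sum to one membership-countP pass (needle list nodup)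
theorem sum_ite_counts (c : Char) : ∀ (V : List Char), V.Nodup →
    (V.map (fun v => (if c = v then (1 : Int) else 0))).sum
      = if V.contains c then 1 else 0 := by
  intro V
  induction V with
  | nil => simp
  | cons u V ih =>
    intro hnd
    rw [List.nodup_cons] at hnd
    by_cases hcu : c = u
    · subst hcu
      have : V.contains c = false := by
        simp [List.contains_eq_mem]; exact hnd.1
      simp only [List.map_cons, List.sum_cons, List.contains_cons, BEq.rfl,
        Bool.true_or, if_true]
      have hz : (V.map (fun v => (if c = v then (1 : Int) else 0))).sum = 0 := by
        rw [ih hnd.2, this]; simp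
      omega
    · simp only [List.map_cons, List.sum_cons, if_neg hcu, zero_add, ih hnd.2,
        List.contains_cons]
      have : (c == u) = false := by simp [hcu]
      rw [this]
      simp

theorem sum_counts (V : List Char) (hnd : V.Nodup) : ∀ (t : List Char),
    (V.map (fun v => (t.count v : Int))).sum = (t.countP (fun c => V.contains c) : Int) := by
  intro t
  induction t with
  | nil => simp
  | cons c t ih =>
    have hsplit : (V.map (fun v => ((c :: t).count v : Int))).sum
        = (V.map (fun v => (t.count v : Int))).sum
          + (V.map (fun v => (if c = v then (1 : Int) else 0))).sum := by
      rw [← List.sum_map_add]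
      congr 1
      apply List.map_congr_left
      intro v _
      rw [List.count_cons]
      by_cases h : c = v <;> simp [h]
    rw [hsplit, ih, sum_ite_counts c V hnd, List.countP_cons]
    by_cases h : V.contains c <;> simp [h]
-- (end of sum_counts)

-- ===== VERDICT (by name: the statement is the Claim_ definition above) =====

theorem disticnt_txt_spec : Claim_equal_disticnt_txt := by
  intro txt limit _hdom hpre
  unfold Spec_disticnt_txt disticnt_txt disticnt_txt_alt
  unfold Pre_disticnt_txt at hpre
  set s : List Char := PySem.Chars.lower (PySem.Chars.replace txt.toList [' '] []) with hs
  rw [if_pos (by exact hpre), if_pos (by exact hpre)]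
  -- A side: the loop is a countP over range limit.toNat
  rw [PySem.List.foldl_if_add_one, zero_add]
  rw [PySem.List.pyRange_one, List.countP_map]
  -- B side: the slice is the prefix take limit.toNat
  have hmax : (0 : Int) ≤ max 0 limit := le_max_left _ _
  have htoNat : (max 0 limit).toNat = limit.toNat := by omega
  rw [PySem.List.slice_to _ hmax, htoNat]
  have hcnt : (("aeiou".toList).map
      (fun v => (PySem.Chars.count (s.take limit.toNat) [v] : Int))).sum
      = (("aeiou".toList).map (fun v => ((s.take limit.toNat).count v : Int))).sum := by
    congr 1
    apply List.map_congr_left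
    intro v _
    rw [count_single]
  rw [hcnt, sum_counts "aeiou".toList (by decide) (s.take limit.toNat)]
  have hle : (limit - 0).toNat ≤ s.length := by omega
  have hcong : List.countP
      ((fun i => (['a','e','i','o','u'] : List Char).contains (PySem.List.pyGetD s i ' ')) ∘
        (fun k : Nat => (0 : Int) + (k : Int)))
      (List.range (limit - 0).toNat)
      = List.countP (fun k : Nat => (['a','e','i','o','u'] : List Char).contains (s.getD k ' '))
        (List.range (limit - 0).toNat) := by
    apply List.countP_congr
    intro k _
    simp [Function.comp, PySem.List.pyGetD_natCast]
  rw [hcong, countP_getD_range _ ' ' _ s hle]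
  have h2 : (limit - 0).toNat = limit.toNat := by omega
  rw [h2]
  rfl
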